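-- pv_equiv track=rewrite | github.com/hlibbabii/log-recommender | log_recommender/dataprep/to_repr.py | gen_dir_name
-- ===== SOURCE A (Python) =====
-- def gen_dir_name(new_preprocessing_param_dict):
--     yes = ""
--     no = ""
--     unknown = ""
--     for (k,v) in new_preprocessing_param_dict.items():
--         if v is None:
--             unknown += (k + "_unk_")
--         elif v:
--             yes += (k + "_1_")
--         else:
--             no += (k + "_0_")
--     return (yes + no + unknown)[:-1]
-- ===== SOURCE B (Python) =====
-- def gen_dir_name(new_preprocessing_param_dict):
--     items = new_preprocessing_param_dict.items()
--     yes = [k + "_1" for k, v in items if v is not None and v]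
--     no = [k + "_0" for k, v in items if v is not None and not v]
--     unknown = [k + "_unk" for k, v in items if v is None]
--     return "_".join(yes + no + unknown)
-- ===== Notes on version B (the rewrite author's own statement) =====
-- stated objective: simpler
-- what changed: Replaces the single branching pass over three string accumulators (trailing '_' chopped with [:-1]) by three filtering comprehensions producing tokens joined once with '_'.join, which handles the empty dict without the slice trick.
import Mathlib
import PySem

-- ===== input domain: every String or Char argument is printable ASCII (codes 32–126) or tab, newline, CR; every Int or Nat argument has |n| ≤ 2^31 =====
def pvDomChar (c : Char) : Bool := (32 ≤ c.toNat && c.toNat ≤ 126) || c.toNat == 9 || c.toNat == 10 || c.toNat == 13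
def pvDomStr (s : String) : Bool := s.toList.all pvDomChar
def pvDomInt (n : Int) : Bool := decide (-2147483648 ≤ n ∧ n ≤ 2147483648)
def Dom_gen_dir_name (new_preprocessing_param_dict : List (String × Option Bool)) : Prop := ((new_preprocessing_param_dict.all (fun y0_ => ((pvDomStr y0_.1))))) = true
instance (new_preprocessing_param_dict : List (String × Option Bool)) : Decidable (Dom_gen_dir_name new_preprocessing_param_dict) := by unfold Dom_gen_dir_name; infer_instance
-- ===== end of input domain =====

-- B replaces A's single branching pass over three string accumulators (and the [:-1] chop) by three
-- filtering comprehensions producing tokens joined once with "_".join (objective: simpler).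

-- ===== PORT A =====
-- one loop step of A: v is None → unknown, elif v → yes, else → no (strings as List Char)
def pvStepA (acc : List Char × List Char × List Char) (kv : String × Option Bool) :
    List Char × List Char × List Char :=
  match kv.2 with
  | none => (acc.1, acc.2.1, acc.2.2 ++ (kv.1.toList ++ ['_', 'u', 'n', 'k', '_']))
  | some v =>
    if v then (acc.1 ++ (kv.1.toList ++ ['_', '1', '_']), acc.2.1, acc.2.2)
    else (acc.1, acc.2.1 ++ (kv.1.toList ++ ['_', '0', '_']), acc.2.2)

def gen_dir_name (new_preprocessing_param_dict : List (String × Option Bool)) : String :=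
  let r := new_preprocessing_param_dict.foldl pvStepA ([], [], [])
  String.ofList (PySem.List.slice (r.1 ++ r.2.1 ++ r.2.2) none (some (-1)))

-- ===== PORT B =====
def gen_dir_name_alt (new_preprocessing_param_dict : List (String × Option Bool)) : String :=
  let yes := (new_preprocessing_param_dict.filter (fun kv => kv.2 == some true)).map
      (fun kv => kv.1.toList ++ ['_', '1'])
  let no := (new_preprocessing_param_dict.filter (fun kv => kv.2 == some false)).map
      (fun kv => kv.1.toList ++ ['_', '0'])
  let unknown := (new_preprocessing_param_dict.filter (fun kv => kv.2 == none)).map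
      (fun kv => kv.1.toList ++ ['_', 'u', 'n', 'k'])
  String.ofList (PySem.Chars.join ['_'] (yes ++ no ++ unknown))

-- ===== PRECONDITION & SPEC =====
def Spec_gen_dir_name (new_preprocessing_param_dict : List (String × Option Bool)) (out : String) : Prop := out = gen_dir_name_alt new_preprocessing_param_dict
instance (new_preprocessing_param_dict : List (String × Option Bool)) (out : String) : Decidable (Spec_gen_dir_name new_preprocessing_param_dict out) := by unfold Spec_gen_dir_name; infer_instance

-- ===== CLAIM (what is proved, stated in full; the proofs are below) =====
def Claim_equal_gen_dir_name : Prop := ∀ (new_preprocessing_param_dict : List (String × Option Bool)), Dom_gen_dir_name new_preprocessing_param_dict → Spec_gen_dir_name new_preprocessing_param_dict (gen_dir_name new_preprocessing_param_dict)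

-- ===== LEMMAS AND PROOFS =====

-- each token followed by '_' (the shape of A's accumulators)
def pvTokJoin (ts : List (List Char)) : List Char := ts.flatMap (fun t => t ++ ['_'])

def pvYes (l : List (String × Option Bool)) : List (List Char) :=
  (l.filter (fun kv => kv.2 == some true)).map (fun kv => kv.1.toList ++ ['_', '1'])
def pvNo (l : List (String × Option Bool)) : List (List Char) :=
  (l.filter (fun kv => kv.2 == some false)).map (fun kv => kv.1.toList ++ ['_', '0'])
def pvUnk (l : List (String × Option Bool)) : List (List Char) :=
  (l.filter (fun kv => kv.2 == none)).map (fun kv => kv.1.toList ++ ['_', 'u', 'n', 'k'])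

lemma pvFoldA (l : List (String × Option Bool)) (a b c : List Char) :
    l.foldl pvStepA (a, b, c) =
      (a ++ pvTokJoin (pvYes l), b ++ pvTokJoin (pvNo l), c ++ pvTokJoin (pvUnk l)) := by
  induction l generalizing a b c with
  | nil => simp [pvTokJoin, pvYes, pvNo, pvUnk]
  | cons kv rest ih =>
    obtain ⟨k, v⟩ := kv
    match v with
    | none =>
      simp only [List.foldl_cons, pvStepA, ih]
      simp [pvTokJoin, pvYes, pvNo, pvUnk, List.append_assoc]
    | some true =>
      simp only [List.foldl_cons, pvStepA, ih]
      simp [pvTokJoin, pvYes, pvNo, pvUnk, List.append_assoc]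
    | some false =>
      simp only [List.foldl_cons, pvStepA, ih]
      simp [pvTokJoin, pvYes, pvNo, pvUnk, List.append_assoc]

lemma pvTokJoin_ne_nil (t : List Char) (ts : List (List Char)) :
    pvTokJoin (t :: ts) ≠ [] := by
  simp [pvTokJoin]

lemma pvDropLast_tokJoin (ts : List (List Char)) :
    (pvTokJoin ts).dropLast = PySem.Chars.join ['_'] ts := by
  induction ts with
  | nil => simp [pvTokJoin, PySem.Chars.join_nil]
  | cons t rest ih =>
    cases rest with
    | nil => simp [pvTokJoin, PySem.Chars.join_singleton]
    | cons u us =>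
      have hne : pvTokJoin (u :: us) ≠ [] := pvTokJoin_ne_nil u us
      calc (pvTokJoin (t :: u :: us)).dropLast
          = (t ++ ['_'] ++ pvTokJoin (u :: us)).dropLast := by
            simp [pvTokJoin, List.append_assoc]
        _ = t ++ ['_'] ++ (pvTokJoin (u :: us)).dropLast := by
            rw [List.dropLast_append_of_ne_nil hne]
        _ = PySem.Chars.join ['_'] (t :: u :: us) := by
            rw [ih, PySem.Chars.join_cons_cons]

-- ===== VERDICT (by name: the statement is the Claim_ definition above) =====
theorem gen_dir_name_spec : Claim_equal_gen_dir_name := by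
  intro l _
  show gen_dir_name l = gen_dir_name_alt l
  simp only [gen_dir_name, gen_dir_name_alt]
  rw [pvFoldA, PySem.List.slice_to_neg_one]
  simp only [List.nil_append]
  rw [show pvTokJoin (pvYes l) ++ pvTokJoin (pvNo l) ++ pvTokJoin (pvUnk l)
        = pvTokJoin (pvYes l ++ pvNo l ++ pvUnk l) from by simp [pvTokJoin],
     pvDropLast_tokJoin]
  rfl
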